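-- pv_equiv track=rewrite | github.com/Ansh24Sharma/Employee-Database-Ananlyzer | data_generator.py | get_salary_range
-- ===== SOURCE A (Python) =====
-- def get_salary_range(position: str) -> tuple:
--     """Get salary range based on position level."""
--     if any(title in position for title in ['VP', 'CMO', 'CHRO', 'CFO', 'COO']):
--         return (150000, 250000)
--     elif 'Manager' in position or 'Lead' in position:
--         return (90000, 140000)
--     elif 'Senior' in position:
--         return (75000, 110000)
--     elif any(title in position for title in ['Analyst', 'Specialist', 'Coordinator']):
--         return (50000, 80000)
--     else:
--         return (45000, 75000)
-- ===== SOURCE B (Python) =====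
-- _TIERS = {'VP': 0, 'CMO': 0, 'CHRO': 0, 'CFO': 0, 'COO': 0,
--           'Manager': 1, 'Lead': 1,
--           'Senior': 2,
--           'Analyst': 3, 'Specialist': 3, 'Coordinator': 3}
--
-- _RANGES = [(150000, 250000), (90000, 140000), (75000, 110000),
--            (50000, 80000), (45000, 75000)]
--
-- def get_salary_range(position: str) -> tuple:
--     """Single left-to-right scan of the string: at each index record the best
--     (lowest) tier of any title starting there; index the range table by the
--     best tier found (4 = no title found)."""
--     best = 4
--     for i in range(len(position)):
--         for kw, tier in _TIERS.items():
--             if position.startswith(kw, i):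
--                 best = min(best, tier)
--     return _RANGES[best]
-- ===== Notes on version B (the rewrite author's own statement) =====
-- stated objective: alternative
-- what changed: Instead of A's ordered cascade of whole-string substring tests, B makes one left-to-right scan of the string, at each index recording the minimum tier of any title that starts there, and finally indexes a range table by the best tier found.
import Mathlib
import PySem

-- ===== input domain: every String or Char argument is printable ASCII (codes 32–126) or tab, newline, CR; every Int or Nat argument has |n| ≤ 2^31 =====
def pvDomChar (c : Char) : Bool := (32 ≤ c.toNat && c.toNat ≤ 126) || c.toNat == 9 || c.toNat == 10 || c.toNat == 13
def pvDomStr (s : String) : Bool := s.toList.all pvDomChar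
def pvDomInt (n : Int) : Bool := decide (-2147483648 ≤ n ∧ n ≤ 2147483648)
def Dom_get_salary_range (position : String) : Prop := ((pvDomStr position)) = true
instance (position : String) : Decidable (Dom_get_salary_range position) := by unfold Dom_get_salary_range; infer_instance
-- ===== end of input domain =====

-- B replaces A's ordered cascade of substring tests by a single scan of the string that
-- records the minimum matching tier at each index, then indexes a range table; objective: alternative.


-- ===== PORT A =====
def get_salary_range (position : String) : Int × Int :=
  if ["VP", "CMO", "CHRO", "CFO", "COO"].any (fun title => PySem.Str.isIn title position) then
    (150000, 250000)
  else if PySem.Str.isIn "Manager" position || PySem.Str.isIn "Lead" position then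
    (90000, 140000)
  else if PySem.Str.isIn "Senior" position then
    (75000, 110000)
  else if ["Analyst", "Specialist", "Coordinator"].any (fun title => PySem.Str.isIn title position) then
    (50000, 80000)
  else
    (45000, 75000)

-- ===== PORT B =====
-- _TIERS (dict in insertion order) and _RANGES from Source B
def pvTiers : List (String × Nat) :=
  [("VP", 0), ("CMO", 0), ("CHRO", 0), ("CFO", 0), ("COO", 0),
   ("Manager", 1), ("Lead", 1), ("Senior", 2),
   ("Analyst", 3), ("Specialist", 3), ("Coordinator", 3)]

def pvRanges : List (Int × Int) :=
  [(150000, 250000), (90000, 140000), (75000, 110000), (50000, 80000), (45000, 75000)]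

-- inner loop of Source B: for kw, tier in _TIERS.items(): if position.startswith(kw, i): best = min(best, tier)
def pvInner (s : List Char) (i : Nat) (b : Nat) : Nat :=
  pvTiers.foldl (fun b kt => if PySem.Chars.startswith (s.drop i) kt.1.toList then min b kt.2 else b) b

-- outer loop: best = 4; for i in range(len(position)): …
def pvBest (s : List Char) : Nat :=
  (List.range s.length).foldl (fun b i => pvInner s i b) 4

def get_salary_range_alt (position : String) : Int × Int :=
  -- _RANGES[best]; best ≤ 4 always, so the getD default is never used
  pvRanges.getD (pvBest position.toList) (0, 0)

-- ===== PRECONDITION & SPEC =====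
def Spec_get_salary_range (position : String) (out : Int × Int) : Prop := out = get_salary_range_alt position
instance (position : String) (out : Int × Int) : Decidable (Spec_get_salary_range position out) := by unfold Spec_get_salary_range; infer_instance

-- ===== CLAIM (what is proved, stated in full; the proofs are below) =====
def Claim_equal_get_salary_range : Prop := ∀ (position : String), Dom_get_salary_range position → Spec_get_salary_range position (get_salary_range position)

-- ===== LEMMAS AND PROOFS =====

-- generic facts about folds of the shape used by pvBest / pvInner
theorem pvFold_le_init {α : Type} (g : Nat → α → Nat) (h1 : ∀ b x, g b x ≤ b) :
    ∀ (l : List α) (b : Nat), l.foldl g b ≤ b := by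
  intro l
  induction l with
  | nil => intro b; simp
  | cons x tl ih => intro b; exact le_trans (ih (g b x)) (h1 b x)

theorem pvFold_le_of_mem {α : Type} (g : Nat → α → Nat) (Q : α → Nat → Prop)
    (h1 : ∀ b x, g b x ≤ b)
    (h3 : ∀ b x v, Q x v → g b x ≤ v) :
    ∀ (l : List α) (b : Nat) (x : α) (v : Nat), x ∈ l → Q x v → l.foldl g b ≤ v := by
  intro l
  induction l with
  | nil => intro b x v hx; cases hx
  | cons y tl ih =>
      intro b x v hx hq
      rcases List.mem_cons.mp hx with rfl | hx'
      · exact le_trans (pvFold_le_init g h1 tl (g b x)) (h3 b x v hq)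
      · exact ih (g b y) x v hx' hq

theorem pvFold_cases {α : Type} (g : Nat → α → Nat) (Q : α → Nat → Prop)
    (h2 : ∀ b x, g b x = b ∨ Q x (g b x)) :
    ∀ (l : List α) (b : Nat), l.foldl g b = b ∨ ∃ x ∈ l, Q x (l.foldl g b) := by
  intro l
  induction l with
  | nil => intro b; left; rfl
  | cons x tl ih =>
      intro b
      rcases ih (g b x) with h | ⟨y, hy, hq⟩
      · rw [List.foldl_cons, h]
        rcases h2 b x with h' | h'
        · left; exact h'
        · right; exact ⟨x, List.mem_cons_self, h'⟩
      · right; exact ⟨y, List.mem_cons_of_mem _ hy, hq⟩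

-- the inner-step function satisfies the hypotheses
theorem pvInner_le (s : List Char) (i : Nat) (b : Nat) : pvInner s i b ≤ b := by
  apply pvFold_le_init
  intro b kt; dsimp only; split <;> simp

-- matched-candidate predicate for the outer fold
def pvQ (s : List Char) (i : Nat) (v : Nat) : Prop :=
  ∃ kt ∈ pvTiers, PySem.Chars.startswith (s.drop i) kt.1.toList = true ∧ v = kt.2

theorem pvInner_le_of_match (s : List Char) (i : Nat) (b : Nat) (v : Nat)
    (h : pvQ s i v) : pvInner s i b ≤ v := by
  rcases h with ⟨kt, hmem, hsw, rfl⟩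
  apply pvFold_le_of_mem _ (fun kt' v' => PySem.Chars.startswith (s.drop i) kt'.1.toList = true ∧ v' = kt'.2)
    _ _ pvTiers b kt kt.2 hmem ⟨hsw, rfl⟩
  · intro b kt'; dsimp only; split <;> simp
  · rintro b kt' v' ⟨h1, rfl⟩; simp [h1]

theorem pvInner_cases (s : List Char) (i : Nat) (b : Nat) :
    pvInner s i b = b ∨ pvQ s i (pvInner s i b) := by
  have := pvFold_cases
    (fun b kt => if PySem.Chars.startswith (s.drop i) kt.1.toList then min b kt.2 else b)
    (fun kt v => PySem.Chars.startswith (s.drop i) kt.1.toList = true ∧ v ≤ kt.2 ∧ (v = kt.2 ∨ pvQ s i v))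
    ?_ pvTiers b
  · -- massage: the fold result either equals b or is the tier of some matched keyword
    rcases this with h | ⟨kt, hmem, hsw, _, hv⟩
    · left; exact h
    · rcases hv with hv | hv
      · right; exact ⟨kt, hmem, hsw, hv⟩
      · right; exact hv
  · intro b' kt; dsimp only
    split
    · rcases Nat.le_total b' kt.2 with h | h
      · left; omega
      · right; refine ⟨by assumption, by omega, Or.inl (by omega)⟩
    · left; rfl

-- pvBest facts
theorem pvBest_le_four (s : List Char) : pvBest s ≤ 4 := by
  apply pvFold_le_init
  intro b i; exact pvInner_le s i b

theorem pvBest_le_of_match (s : List Char) (i : Nat) (v : Nat)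
    (hi : i ∈ List.range s.length) (h : pvQ s i v) : pvBest s ≤ v :=
  pvFold_le_of_mem _ (pvQ s) (fun b i => pvInner_le s i b)
    (fun b i v h => pvInner_le_of_match s i b v h) _ 4 i v hi h

theorem pvBest_cases (s : List Char) :
    pvBest s = 4 ∨ ∃ i ∈ List.range s.length, pvQ s i (pvBest s) :=
  pvFold_cases _ (pvQ s) (fun b i => pvInner_cases s i b) _ 4

-- bridge: 'kw in position' (A's test) ↔ some index of the scan matches (B's test), for nonempty kw
theorem pvIsIn_iff_scan (kw position : String) (hne : kw.toList ≠ []) :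
    PySem.Str.isIn kw position = true ↔
      ∃ i ∈ List.range position.toList.length, PySem.Chars.startswith (position.toList.drop i) kw.toList = true := by
  rw [PySem.Str.isIn_iff_infix]
  constructor
  · intro h
    obtain ⟨j, hj⟩ := (PySem.Chars.exists_prefix_drop_iff_isIn kw.toList position.toList).mpr
      ((PySem.Chars.isIn_iff_infix _ _).mpr h)
    have hjlt : j < position.toList.length := by
      by_contra hge
      have : position.toList.drop j = [] := List.drop_eq_nil_of_le (by omega)
      rw [this] at hj
      exact hne (List.prefix_nil.mp hj)
    exact ⟨j, List.mem_range.mpr hjlt, (PySem.Chars.startswith_iff _ _).mpr hj⟩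
  · rintro ⟨i, _, hsw⟩
    exact (PySem.Chars.isIn_iff_infix _ _).mp
      ((PySem.Chars.exists_prefix_drop_iff_isIn kw.toList position.toList).mp
        ⟨i, (PySem.Chars.startswith_iff _ _).mp hsw⟩)

-- tier-k match (in A's terms): some keyword of tier k occurs in position
def pvHit (position : String) (k : Nat) : Prop :=
  ∃ kt ∈ pvTiers, kt.2 = k ∧ PySem.Str.isIn kt.1 position = true

theorem pvTiers_ne_nil : ∀ kt ∈ pvTiers, kt.1.toList ≠ [] := by decide

theorem pvBest_le_of_hit (position : String) (k : Nat) (h : pvHit position k) :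
    pvBest position.toList ≤ k := by
  rcases h with ⟨kt, hmem, rfl, hin⟩
  obtain ⟨i, hi, hsw⟩ := (pvIsIn_iff_scan kt.1 position (pvTiers_ne_nil kt hmem)).mp hin
  exact pvBest_le_of_match _ i kt.2 hi ⟨kt, hmem, hsw, rfl⟩

theorem pvBest_hit_or_four (position : String) :
    pvBest position.toList = 4 ∨ pvHit position (pvBest position.toList) := by
  rcases pvBest_cases position.toList with h | ⟨i, _, kt, hmem, hsw, hv⟩
  · left; exact h
  · right
    refine ⟨kt, hmem, hv.symm, ?_⟩
    exact (pvIsIn_iff_scan kt.1 position (pvTiers_ne_nil kt hmem)).mpr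
      ⟨i, by simpa using List.mem_range.mp (by assumption), hsw⟩

-- ===== VERDICT (by name: the statement is the Claim_ definition above) =====
theorem get_salary_range_spec : Claim_equal_get_salary_range := by
  intro position _
  unfold Spec_get_salary_range get_salary_range get_salary_range_alt
  have hle := pvBest_le_four position.toList
  have hcases := pvBest_hit_or_four position
  have hlow := pvBest_le_of_hit position
  -- abbreviations for A's four cascade conditions
  simp only [List.any_cons, List.any_nil, Bool.or_false]
  by_cases c0 : PySem.Str.isIn "VP" position = true ∨ PySem.Str.isIn "CMO" position = true ∨
      PySem.Str.isIn "CHRO" position = true ∨ PySem.Str.isIn "CFO" position = true ∨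
      PySem.Str.isIn "COO" position = true
  · have h0 : pvBest position.toList = 0 := by
      have : pvBest position.toList ≤ 0 := by
        rcases c0 with h | h | h | h | h <;>
          [exact hlow 0 ⟨("VP", 0), by decide, rfl, h⟩;
           exact hlow 0 ⟨("CMO", 0), by decide, rfl, h⟩;
           exact hlow 0 ⟨("CHRO", 0), by decide, rfl, h⟩;
           exact hlow 0 ⟨("CFO", 0), by decide, rfl, h⟩;
           exact hlow 0 ⟨("COO", 0), by decide, rfl, h⟩]
      omega
    rw [if_pos (by simp only [Bool.or_eq_true]; tauto), h0]; rfl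
  · simp only [not_or] at c0
    obtain ⟨n0, n1, n2, n3, n4⟩ := c0
    rw [if_neg (by simp only [Bool.or_eq_true, not_or]; exact ⟨n0, n1, n2, n3, n4⟩)]
    have hno0 : pvBest position.toList ≠ 0 := by
      intro h
      rcases hcases with h4 | ⟨kt, hmem, hk, hin⟩
      · omega
      · rw [h] at hk
        fin_cases hmem <;> simp_all
    by_cases c1 : PySem.Str.isIn "Manager" position = true ∨ PySem.Str.isIn "Lead" position = true
    · have h1 : pvBest position.toList = 1 := by
        have : pvBest position.toList ≤ 1 := by
          rcases c1 with h | h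
          · exact hlow 1 ⟨("Manager", 1), by decide, rfl, h⟩
          · exact hlow 1 ⟨("Lead", 1), by decide, rfl, h⟩
        omega
      rw [if_pos (by simp only [Bool.or_eq_true]; tauto), h1]; rfl
    · simp only [not_or] at c1
      obtain ⟨m0, m1⟩ := c1
      rw [if_neg (by simp only [Bool.or_eq_true, not_or]; exact ⟨m0, m1⟩)]
      have hno1 : pvBest position.toList ≠ 1 := by
        intro h
        rcases hcases with h4 | ⟨kt, hmem, hk, hin⟩
        · omega
        · rw [h] at hk
          fin_cases hmem <;> simp_all
      by_cases c2 : PySem.Str.isIn "Senior" position = true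
      · have h2 : pvBest position.toList = 2 := by
          have : pvBest position.toList ≤ 2 := hlow 2 ⟨("Senior", 2), by decide, rfl, c2⟩
          omega
        rw [if_pos c2, h2]; rfl
      · rw [if_neg c2]
        have hno2 : pvBest position.toList ≠ 2 := by
          intro h
          rcases hcases with h4 | ⟨kt, hmem, hk, hin⟩
          · omega
          · rw [h] at hk
            fin_cases hmem <;> simp_all
        by_cases c3 : PySem.Str.isIn "Analyst" position = true ∨
            PySem.Str.isIn "Specialist" position = true ∨ PySem.Str.isIn "Coordinator" position = true
        · have h3 : pvBest position.toList = 3 := by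
            have : pvBest position.toList ≤ 3 := by
              rcases c3 with h | h | h <;>
                [exact hlow 3 ⟨("Analyst", 3), by decide, rfl, h⟩;
                 exact hlow 3 ⟨("Specialist", 3), by decide, rfl, h⟩;
                 exact hlow 3 ⟨("Coordinator", 3), by decide, rfl, h⟩]
            omega
          rw [if_pos (by simp only [Bool.or_eq_true]; tauto), h3]; rfl
        · simp only [not_or] at c3
          obtain ⟨p0, p1, p2⟩ := c3
          rw [if_neg (by simp only [Bool.or_eq_true, not_or]; exact ⟨p0, p1, p2⟩)]
          have hno3 : pvBest position.toList ≠ 3 := by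
            intro h
            rcases hcases with h4 | ⟨kt, hmem, hk, hin⟩
            · omega
            · rw [h] at hk
              fin_cases hmem <;> simp_all
          have h4 : pvBest position.toList = 4 := by omega
          rw [h4]; rfl
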